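-- pv_equiv track=rewrite | github.com/vanchien/ToolFB | src/gui/video_editor_tab.py | _match_quality_export_label
-- ===== SOURCE A (Python) =====
-- from typing import Any
--
-- QUALITY_EXPORT_ITEMS: tuple[tuple[str, str, int], ...] = (
--     ("Rất nhanh — nhỏ gọn (nháp)", "ultrafast", 28),
--     ("Nhanh — mặc định", "veryfast", 23),
--     ("Cân bằng — khuyên dùng", "medium", 20),
--     ("Chất lượng cao", "slow", 18),
--     ("Tối đa — file lớn", "slower", 16),
-- )
--
-- def _match_quality_export_label(preset: str, crf: Any) -> str:
--     pr = str(preset or "veryfast")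
--     try:
--         cr = int(crf)
--     except (TypeError, ValueError):
--         cr = 23
--     for lab, p, c in QUALITY_EXPORT_ITEMS:
--         if p == pr and c == cr:
--             return lab
--     for lab, p, c in QUALITY_EXPORT_ITEMS:
--         if p == pr:
--             return lab
--     return QUALITY_EXPORT_ITEMS[1][0]
-- ===== SOURCE B (Python) =====
-- from typing import Any
--
-- QUALITY_EXPORT_ITEMS: tuple[tuple[str, str, int], ...] = (
--     ("Rất nhanh — nhỏ gọn (nháp)", "ultrafast", 28),
--     ("Nhanh — mặc định", "veryfast", 23),
--     ("Cân bằng — khuyên dùng", "medium", 20),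
--     ("Chất lượng cao", "slow", 18),
--     ("Tối đa — file lớn", "slower", 16),
-- )
--
-- def _match_quality_export_label(preset: str, crf: Any) -> str:
--     pr = str(preset or "veryfast")
--     try:
--         cr = int(crf)
--     except (TypeError, ValueError):
--         cr = 23
--     fallback = None
--     for lab, p, c in QUALITY_EXPORT_ITEMS:
--         if p == pr:
--             if c == cr:
--                 return lab
--             if fallback is None:
--                 fallback = lab
--     return fallback if fallback is not None else QUALITY_EXPORT_ITEMS[1][0]
-- ===== Notes on version B (the rewrite author's own statement) =====
-- stated objective: alternative
-- what changed: Replaces A's two sequential scans of QUALITY_EXPORT_ITEMS (exact preset+crf match, then preset-only match) with a single pass carrying an Option fallback accumulator: the first exact match returns immediately, the first preset-only match is recorded as a fallback returned after the loop.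
import Mathlib
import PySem

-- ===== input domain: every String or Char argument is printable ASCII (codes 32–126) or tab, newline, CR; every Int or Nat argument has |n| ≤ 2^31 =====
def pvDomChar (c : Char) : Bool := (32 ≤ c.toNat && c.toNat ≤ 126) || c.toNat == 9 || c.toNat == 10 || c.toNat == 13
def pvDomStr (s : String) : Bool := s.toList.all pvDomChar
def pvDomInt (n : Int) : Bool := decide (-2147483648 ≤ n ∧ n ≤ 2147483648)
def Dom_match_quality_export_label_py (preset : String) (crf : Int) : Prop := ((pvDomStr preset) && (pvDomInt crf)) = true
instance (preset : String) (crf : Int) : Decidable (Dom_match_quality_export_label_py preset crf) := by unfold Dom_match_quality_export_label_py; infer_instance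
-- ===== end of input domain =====

-- B replaces A's two sequential scans of the quality table by one pass carrying a
-- fallback accumulator (objective: alternative decomposition, same cost).

-- ===== PORT A =====
def qualityExportItems : List (String × String × Int) :=
  [("Rất nhanh — nhỏ gọn (nháp)", "ultrafast", 28),
   ("Nhanh — mặc định", "veryfast", 23),
   ("Cân bằng — khuyên dùng", "medium", 20),
   ("Chất lượng cao", "slow", 18),
   ("Tối đa — file lớn", "slower", 16)]

-- first loop of A: return lab on the first exact (preset, crf) match
def pvLoopExact : List (String × String × Int) → String → Int → Option String
  | [], _, _ => none
  | (lab, p, c) :: rest, pr, cr =>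
      if p = pr ∧ c = cr then some lab else pvLoopExact rest pr cr

-- second loop of A: return lab on the first preset-only match
def pvLoopPreset : List (String × String × Int) → String → Option String
  | [], _ => none
  | (lab, p, _) :: rest, pr =>
      if p = pr then some lab else pvLoopPreset rest pr

def match_quality_export_label_py (preset : String) (crf : Int) : String :=
  let pr := if preset = "" then "veryfast" else preset   -- str(preset or "veryfast")
  let cr := crf                                           -- int(crf) never raises on an int
  match pvLoopExact qualityExportItems pr cr with
  | some lab => lab
  | none =>
    match pvLoopPreset qualityExportItems pr with
    | some lab => lab
    | none => "Nhanh — mặc định"                          -- QUALITY_EXPORT_ITEMS[1][0]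

-- ===== PORT B =====
-- single pass: exact match returns at once, first preset-only match is recorded as fallback
def pvLoopOnce : List (String × String × Int) → String → Int → Option String → String
  | [], _, _, fb => fb.getD "Nhanh — mặc định"
  | (lab, p, c) :: rest, pr, cr, fb =>
      if p = pr then
        if c = cr then lab
        else pvLoopOnce rest pr cr (if fb.isNone then some lab else fb)
      else pvLoopOnce rest pr cr fb

def match_quality_export_label_py_alt (preset : String) (crf : Int) : String :=
  let pr := if preset = "" then "veryfast" else preset
  let cr := crf
  pvLoopOnce qualityExportItems pr cr none

-- ===== PRECONDITION & SPEC =====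
def Spec_match_quality_export_label_py (preset : String) (crf : Int) (out : String) : Prop := out = match_quality_export_label_py_alt preset crf
instance (preset : String) (crf : Int) (out : String) : Decidable (Spec_match_quality_export_label_py preset crf out) := by unfold Spec_match_quality_export_label_py; infer_instance

-- ===== CLAIM (what is proved, stated in full; the proofs are below) =====
def Claim_equal_match_quality_export_label_py : Prop := ∀ (preset : String) (crf : Int), Dom_match_quality_export_label_py preset crf → Spec_match_quality_export_label_py preset crf (match_quality_export_label_py preset crf)

-- ===== LEMMAS AND PROOFS =====

-- the one-pass loop with fallback computes: first exact match, else fallback, else first preset match, else default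
theorem pvLoopOnce_eq (items : List (String × String × Int)) (pr : String) (cr : Int)
    (fb : Option String) :
    pvLoopOnce items pr cr fb =
      match pvLoopExact items pr cr with
      | some lab => lab
      | none =>
        match fb with
        | some f => f
        | none =>
          match pvLoopPreset items pr with
          | some lab => lab
          | none => "Nhanh — mặc định" := by
  induction items generalizing fb with
  | nil => cases fb <;> simp [pvLoopOnce, pvLoopExact, pvLoopPreset]
  | cons hd tl ih =>
      obtain ⟨lab, p, c⟩ := hd
      by_cases hp : p = pr <;> by_cases hc : c = cr <;>
        cases fb <;>
        simp [pvLoopOnce, pvLoopExact, pvLoopPreset, hp, hc, ih]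

-- ===== VERDICT (by name: the statement is the Claim_ definition above) =====
theorem match_quality_export_label_py_spec : Claim_equal_match_quality_export_label_py := by
  intro preset crf _
  unfold Spec_match_quality_export_label_py match_quality_export_label_py match_quality_export_label_py_alt
  rw [pvLoopOnce_eq]
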